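-- pv_equiv track=rewrite | github.com/SonarSource/sonar-python | python-checks/src/test/resources/checks/invariantReturn.py | f_previous_assignment_in_a_loop
-- ===== SOURCE A (Python) =====
-- def f_previous_assignment_in_a_loop(x, i):
--     a = 2
--     while i < 0:
--         a = 3
--         i += 1
--     if x:
--         return a
--     else:
--         return a
-- ===== SOURCE B (Python) =====
-- def f_previous_assignment_in_a_loop(x, i):
--     return 3 if i < 0 else 2
-- ===== Notes on version B (the rewrite author's own statement) =====
-- stated objective: simpler
-- what changed: Replaced the while loop and the redundant if/else on x by the closed-form expression '3 if i < 0 else 2': the loop sets a to 3 exactly when i < 0, and both branches return a.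
import Mathlib
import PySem

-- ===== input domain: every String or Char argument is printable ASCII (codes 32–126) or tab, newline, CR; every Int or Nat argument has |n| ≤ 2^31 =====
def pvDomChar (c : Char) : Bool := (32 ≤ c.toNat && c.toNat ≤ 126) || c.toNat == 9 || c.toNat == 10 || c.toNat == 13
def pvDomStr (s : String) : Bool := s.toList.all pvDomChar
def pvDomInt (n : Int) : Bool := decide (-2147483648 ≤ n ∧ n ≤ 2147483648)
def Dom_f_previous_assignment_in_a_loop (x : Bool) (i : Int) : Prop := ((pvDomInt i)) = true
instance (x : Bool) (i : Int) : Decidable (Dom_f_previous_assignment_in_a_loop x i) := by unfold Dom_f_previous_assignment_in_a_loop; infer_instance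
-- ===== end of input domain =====

-- B replaces A's while loop and redundant if/else with the closed form '3 if i < 0 else 2' (simpler, same value).

-- ===== PORT A =====
-- the 'while i < 0: a = 3; i += 1' loop, step for step
def pvLoopA (a : Int) (i : Int) : Int :=
  if i < 0 then pvLoopA 3 (i + 1) else a
termination_by (-i).toNat
decreasing_by omega

def f_previous_assignment_in_a_loop (x : Bool) (i : Int) : Int :=
  let a := pvLoopA 2 i
  if x then a else a

-- ===== PORT B =====
def f_previous_assignment_in_a_loop_alt (x : Bool) (i : Int) : Int :=
  if i < 0 then 3 else 2

-- ===== PRECONDITION & SPEC =====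
def Spec_f_previous_assignment_in_a_loop (x : Bool) (i : Int) (out : Int) : Prop := out = f_previous_assignment_in_a_loop_alt x i
instance (x : Bool) (i : Int) (out : Int) : Decidable (Spec_f_previous_assignment_in_a_loop x i out) := by unfold Spec_f_previous_assignment_in_a_loop; infer_instance

-- ===== CLAIM (what is proved, stated in full; the proofs are below) =====
def Claim_equal_f_previous_assignment_in_a_loop : Prop := ∀ (x : Bool) (i : Int), Dom_f_previous_assignment_in_a_loop x i → Spec_f_previous_assignment_in_a_loop x i (f_previous_assignment_in_a_loop x i)

-- ===== LEMMAS AND PROOFS =====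
theorem pvLoopA_eq (a i : Int) : pvLoopA a i = if i < 0 then 3 else a := by
  induction a, i using pvLoopA.induct with
  | case1 a i h ih =>
      rw [pvLoopA, if_pos h, ih]
      by_cases h' : i + 1 < 0 <;> simp [h, h']
  | case2 a i h =>
      rw [pvLoopA, if_neg h, if_neg h]

-- ===== VERDICT (by name: the statement is the Claim_ definition above) =====
theorem f_previous_assignment_in_a_loop_spec : Claim_equal_f_previous_assignment_in_a_loop := by
  intro x i _
  unfold Spec_f_previous_assignment_in_a_loop f_previous_assignment_in_a_loop f_previous_assignment_in_a_loop_alt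
  simp [pvLoopA_eq]
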